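-- pv_equiv track=rewrite | github.com/chirag9127/programming_puzzles | recursion/jumping_jack.py | jumping_jack
-- ===== SOURCE A (Python) =====
-- def jumping_jack(n, k):
--     res = 0
--     visited_k = False
--     for i in range(1, n + 1):
--         res += i
--         if res == k:
--             visited_k = True
--
--     if visited_k:
--         return res - 1
--     return res
-- ===== SOURCE B (Python) =====
-- def _found(k, lo, hi):
--     # binary search for an index i in [lo, hi] with i*(i+1)//2 == k
--     while lo <= hi:
--         mid = (lo + hi) // 2
--         t = mid * (mid + 1) // 2
--         if t == k:
--             return True
--         if t < k:
--             lo = mid + 1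
--         else:
--             hi = mid - 1
--     return False
--
--
-- def jumping_jack(n, k):
--     if n <= 0:
--         return 0
--     total = n * (n + 1) // 2
--     return total - 1 if _found(k, 1, n) else total
-- ===== Notes on version B (the rewrite author's own statement) =====
-- stated objective: faster
-- what changed: Replaces the linear scan that sums 1..n while comparing every prefix sum with k by the closed-form sum n(n+1)/2 plus a binary search for a triangular index i in [1,n] with i(i+1)/2 = k (prefix sums are strictly increasing).
import Mathlib
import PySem

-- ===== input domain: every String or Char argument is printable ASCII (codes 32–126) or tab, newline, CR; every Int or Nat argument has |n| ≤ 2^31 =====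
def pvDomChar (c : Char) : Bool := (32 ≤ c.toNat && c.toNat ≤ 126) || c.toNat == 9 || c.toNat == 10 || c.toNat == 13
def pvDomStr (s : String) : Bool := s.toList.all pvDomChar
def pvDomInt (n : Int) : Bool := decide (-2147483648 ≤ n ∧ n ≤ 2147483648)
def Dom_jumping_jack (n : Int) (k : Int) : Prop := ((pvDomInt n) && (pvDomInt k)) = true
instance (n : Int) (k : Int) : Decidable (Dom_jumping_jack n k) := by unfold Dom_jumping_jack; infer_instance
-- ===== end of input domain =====

-- B replaces A's O(n) prefix-sum scan by the closed-form sum n(n+1)/2 and a binary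
-- search for a triangular index i in [1,n] with i(i+1)//2 = k (objective: faster).

-- ===== PORT A =====
def jumping_jack (n : Int) (k : Int) : Int :=
  let s := (PySem.List.pyRange 1 (n + 1) 1).foldl
    (fun (st : Int × Bool) i =>
      let res := st.1 + i
      (res, if res = k then true else st.2))
    (0, false)
  if s.2 = true then s.1 - 1 else s.1

-- ===== PORT B =====
-- Source B's helper `_found`: binary search for i in [lo, hi] with i*(i+1)//2 == k.
-- The `while` loop is ported with an explicit fuel counter (≥ number of remaining
-- interval elements) as a totality guard; locals `mid`/`t` are inlined.
def jjFoundFuel (fuel : Nat) (k lo hi : Int) : Bool :=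
  match fuel with
  | 0 => false
  | fuel + 1 =>
    if lo ≤ hi then
      if PySem.Int.floordiv (PySem.Int.floordiv (lo + hi) 2 * (PySem.Int.floordiv (lo + hi) 2 + 1)) 2 = k then
        true
      else if PySem.Int.floordiv (PySem.Int.floordiv (lo + hi) 2 * (PySem.Int.floordiv (lo + hi) 2 + 1)) 2 < k then
        jjFoundFuel fuel k (PySem.Int.floordiv (lo + hi) 2 + 1) hi
      else
        jjFoundFuel fuel k lo (PySem.Int.floordiv (lo + hi) 2 - 1)
    else false

def jjFound (k lo hi : Int) : Bool := jjFoundFuel (hi - lo + 1).toNat k lo hi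

def jumping_jack_alt (n : Int) (k : Int) : Int :=
  if n ≤ 0 then 0
  else
    let total := PySem.Int.floordiv (n * (n + 1)) 2
    if jjFound k 1 n then total - 1 else total

-- ===== PRECONDITION & SPEC =====
def Spec_jumping_jack (n : Int) (k : Int) (out : Int) : Prop := out = jumping_jack_alt n k
instance (n : Int) (k : Int) (out : Int) : Decidable (Spec_jumping_jack n k out) := by unfold Spec_jumping_jack; infer_instance

-- ===== CLAIM (what is proved, stated in full; the proofs are below) =====
def Claim_equal_jumping_jack : Prop := ∀ (n : Int) (k : Int), Dom_jumping_jack n k → Spec_jumping_jack n k (jumping_jack n k)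

-- ===== LEMMAS AND PROOFS =====

-- the i-th triangular number, as both ports compute it
def jjT (i : Int) : Int := PySem.Int.floordiv (i * (i + 1)) 2

theorem jjT_two_mul (i : Int) : 2 * jjT i = i * (i + 1) := by
  obtain ⟨m, hm⟩ := Int.even_mul_succ_self i
  unfold jjT
  rw [PySem.Int.floordiv_eq_ediv_of_pos (by norm_num)]
  omega

theorem jjT_lt (a b : Int) (h0 : 0 ≤ a) (hab : a < b) : jjT a < jjT b := by
  have h1 := jjT_two_mul a
  have h2 := jjT_two_mul b
  nlinarith

theorem jjT_succ (i : Int) : jjT (i + 1) = jjT i + (i + 1) := by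
  have h1 := jjT_two_mul i
  have h2 := jjT_two_mul (i + 1)
  nlinarith

-- A's loop: the prefix sum after 1..n is jjT n, and the flag records whether some
-- prefix sum (i.e. some jjT i, 1 ≤ i ≤ n) equals k.
theorem foldA (k : Int) : ∀ n : Int, 0 ≤ n →
    ((PySem.List.pyRange 1 (n + 1) 1).foldl
      (fun (st : Int × Bool) i =>
        let res := st.1 + i
        (res, if res = k then true else st.2))
      (0, false)).1 = jjT n ∧
    (((PySem.List.pyRange 1 (n + 1) 1).foldl
      (fun (st : Int × Bool) i =>
        let res := st.1 + i
        (res, if res = k then true else st.2))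
      (0, false)).2 = true ↔ ∃ i, 1 ≤ i ∧ i ≤ n ∧ jjT i = k) := by
  intro n hn
  induction n, hn using Int.le_induction with
  | base =>
      rw [PySem.List.pyRange_one_eq_nil (by omega)]
      refine ⟨by simp [jjT, PySem.Int.floordiv], ?_⟩
      simp only [List.foldl_nil]
      constructor
      · intro h; exact absurd h (by simp)
      · rintro ⟨i, h1, h2, _⟩; omega
  | succ m hm ih =>
      obtain ⟨ih1, ih2⟩ := ih
      rw [show m + 1 + 1 = (m + 1) + 1 by ring,
          PySem.List.pyRange_one_succ_right (by omega), List.foldl_append]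
      simp only [List.foldl_cons, List.foldl_nil]
      rw [ih1]
      refine ⟨by simpa using (jjT_succ m).symm, ?_⟩
      by_cases hk : jjT m + (m + 1) = k
      · simp only [hk, if_pos]
        constructor
        · intro _; exact ⟨m + 1, by omega, by omega, by rw [jjT_succ]; omega⟩
        · intro _; trivial
      · rw [if_neg hk, ih2]
        constructor
        · rintro ⟨i, h1, h2, h3⟩; exact ⟨i, h1, by omega, h3⟩
        · rintro ⟨i, h1, h2, h3⟩
          refine ⟨i, h1, ?_, h3⟩
          by_contra hgt
          have : i = m + 1 := by omega
          subst this
          rw [jjT_succ] at h3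
          omega

-- B's binary search is a decision procedure for that existential (given enough fuel).
theorem jjFoundFuel_iff (k : Int) : ∀ (fuel : Nat) (lo hi : Int), 1 ≤ lo →
    (hi - lo + 1).toNat ≤ fuel →
    (jjFoundFuel fuel k lo hi = true ↔ ∃ i, lo ≤ i ∧ i ≤ hi ∧ jjT i = k) := by
  intro fuel
  induction fuel with
  | zero =>
      intro lo hi hlo hfuel
      exact ⟨fun hf => absurd hf (by simp [jjFoundFuel]),
             fun ⟨i, h1, h2, _⟩ => absurd hfuel (by omega)⟩
  | succ fuel ih =>
      intro lo hi hlo hfuel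
      simp only [jjFoundFuel]
      by_cases h : lo ≤ hi
      · rw [if_pos h]
        have hb := PySem.Int.floordiv_two_mid_bounds h
        set mid := PySem.Int.floordiv (lo + hi) 2 with hmid
        by_cases heq : PySem.Int.floordiv (mid * (mid + 1)) 2 = k
        · rw [if_pos heq]
          exact ⟨fun _ => ⟨mid, hb.1, hb.2, heq⟩, fun _ => rfl⟩
        · rw [if_neg heq]
          by_cases hlt : PySem.Int.floordiv (mid * (mid + 1)) 2 < k
          · rw [if_pos hlt, ih (mid + 1) hi (by omega) (by omega)]
            constructor
            · rintro ⟨i, h1, h2, h3⟩; exact ⟨i, by omega, h2, h3⟩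
            · rintro ⟨i, h1, h2, h3⟩
              refine ⟨i, ?_, h2, h3⟩
              by_contra hle
              have hmono : jjT i ≤ jjT mid := by
                rcases lt_or_eq_of_le (show i ≤ mid by omega) with hc | hc
                · exact le_of_lt (jjT_lt i mid (by omega) hc)
                · rw [hc]
              have hltk : jjT mid < k := hlt
              omega
          · rw [if_neg hlt, ih lo (mid - 1) hlo (by omega)]
            constructor
            · rintro ⟨i, h1, h2, h3⟩; exact ⟨i, h1, by omega, h3⟩
            · rintro ⟨i, h1, h2, h3⟩
              refine ⟨i, h1, ?_, h3⟩
              by_contra hgt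
              have hk : k < jjT mid := by
                have hne' : ¬ (jjT mid = k) := heq
                have hge' : ¬ (jjT mid < k) := hlt
                omega
              have hmono : jjT mid ≤ jjT i := by
                rcases lt_or_eq_of_le (show mid ≤ i by omega) with hc | hc
                · exact le_of_lt (jjT_lt mid i (by omega) hc)
                · rw [hc]
              omega
      · rw [if_neg h]
        exact ⟨fun hf => absurd hf (by simp),
               fun ⟨i, h1, h2, _⟩ => absurd h (by omega)⟩

theorem jjFound_iff (k lo hi : Int) (hlo : 1 ≤ lo) :
    jjFound k lo hi = true ↔ ∃ i, lo ≤ i ∧ i ≤ hi ∧ jjT i = k :=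
  jjFoundFuel_iff k (hi - lo + 1).toNat lo hi hlo (le_refl _)

-- ===== VERDICT (by name: the statement is the Claim_ definition above) =====
theorem jumping_jack_spec : Claim_equal_jumping_jack := by
  intro n k _
  unfold Spec_jumping_jack
  have hAeq : jumping_jack n k =
      if ((PySem.List.pyRange 1 (n + 1) 1).foldl
        (fun (st : Int × Bool) i =>
          let res := st.1 + i
          (res, if res = k then true else st.2)) (0, false)).2 = true
      then ((PySem.List.pyRange 1 (n + 1) 1).foldl
        (fun (st : Int × Bool) i =>
          let res := st.1 + i
          (res, if res = k then true else st.2)) (0, false)).1 - 1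
      else ((PySem.List.pyRange 1 (n + 1) 1).foldl
        (fun (st : Int × Bool) i =>
          let res := st.1 + i
          (res, if res = k then true else st.2)) (0, false)).1 := rfl
  have hBeq : jumping_jack_alt n k =
      if n ≤ 0 then 0
      else if jjFound k 1 n = true then PySem.Int.floordiv (n * (n + 1)) 2 - 1
           else PySem.Int.floordiv (n * (n + 1)) 2 := rfl
  rw [hAeq, hBeq]
  by_cases hn : n ≤ 0
  · rw [PySem.List.pyRange_one_eq_nil (by omega)]
    simp [hn]
  · obtain ⟨h1, h2⟩ := foldA k n (by omega)
    have hcond := h2.trans (jjFound_iff k 1 n (by omega)).symm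
    rw [if_neg hn, h1]
    split_ifs with hA2 hB2 hB2
    · simp [jjT]
    · exact absurd (hcond.mp hA2) hB2
    · exact absurd (hcond.mpr hB2) hA2
    · simp [jjT]
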